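-- pv_equiv track=rewrite | github.com/PdxCodeGuild/class_opal | code/jim/python/lab08_v4_refactor.py | draw_data
-- ===== SOURCE A (Python) =====
-- def draw_data(data: list):
--     drawing = ""
--     for i in range(max(data)):
--         drawing_row = ""
--         for j in range(len(data)):
--             if data[j] >= max(data) - i:
--                 drawing_row += "X "
--             elif j > 0 and data[j] < max(data[j:]) and drawing_row.find("X") > -1:
--                 drawing_row += "O "
--             else:
--                 drawing_row += "  "
--         drawing_row = drawing_row.rstrip("O ") + "\n"
--         drawing += drawing_row
--     return drawing
-- ===== SOURCE B (Python) =====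
-- def draw_data(data: list):
--     m = max(data)
--     n = len(data)
--     # suffix maxima: suf[j] = max(data[j:]), computed once right-to-left
--     suf = []
--     acc = data[-1]
--     for x in reversed(data):
--         acc = max(acc, x)
--         suf.append(acc)
--     suf.reverse()
--     # pre[j] = running max of data[:j] for j >= 1 (pre[0] is never used)
--     pre = []
--     acc = data[0]
--     for x in data:
--         pre.append(acc)
--         acc = max(acc, x)
--     rows = []
--     for t in range(m, 0, -1):
--         cells = []
--         last = 0
--         for j in range(n):
--             if data[j] >= t:
--                 cells.append("X ")
--                 last = j
--             elif j > 0 and data[j] < suf[j] and pre[j] >= t: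
--                 cells.append("O ")
--             else:
--                 cells.append("  ")
--         rows.append("".join(cells[:last]) + "X\n")
--     return "".join(rows)
-- ===== Notes on version B (the rewrite author's own statement) =====
-- stated objective: faster
-- what changed: B hoists max(data) out of the loops and replaces A's per-cell max(data[j:]) rescan and drawing_row.find('X') rescan by a precomputed suffix-maximum array, a running prefix-maximum array and a tracked last-X column index (cells after it are dropped instead of rstrip'ing), turning O(max*n^2) into O(max*n).
-- outside the precondition, e.g. on draw_data([]): A raises ValueError, B raises ValueError
import Mathlib
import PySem

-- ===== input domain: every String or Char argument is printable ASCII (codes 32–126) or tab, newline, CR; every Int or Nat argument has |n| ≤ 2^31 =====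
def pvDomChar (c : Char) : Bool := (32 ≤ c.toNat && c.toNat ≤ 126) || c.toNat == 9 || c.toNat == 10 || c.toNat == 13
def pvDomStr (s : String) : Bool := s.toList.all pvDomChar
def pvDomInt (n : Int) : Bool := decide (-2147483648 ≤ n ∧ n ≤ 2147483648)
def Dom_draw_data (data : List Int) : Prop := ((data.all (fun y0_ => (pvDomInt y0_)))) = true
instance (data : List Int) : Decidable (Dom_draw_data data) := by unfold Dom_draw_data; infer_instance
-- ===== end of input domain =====

-- B replaces A's per-cell max(data)/max(data[j:])/row.find("X") rescans by precomputed
-- suffix-maximum and running-prefix-maximum arrays and a tracked last-X index (faster, asymptotic).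

-- ===== PORT A =====
-- hand port of str.rstrip("O "): drop trailing characters that are 'O' or ' ' (exact)
def pvRstripOSpace (cs : List Char) : List Char :=
  (cs.reverse.dropWhile (fun c => c == 'O' || c == ' ')).reverse

def draw_data (data : List Int) : String :=
  String.ofList (
    (PySem.List.pyRange 0 ((PySem.List.max? data (fun x => x)).getD 0) 1).foldl (fun drawing i =>
      let row := (PySem.List.pyRange 0 (PySem.List.len data) 1).foldl (fun row j =>
        if PySem.List.pyGetD data j 0 ≥ (PySem.List.max? data (fun x => x)).getD 0 - i then
          row ++ ['X', ' ']
        else if 0 < j ∧ PySem.List.pyGetD data j 0 <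
              (PySem.List.max? (PySem.List.slice data (some j) none) (fun x => x)).getD 0 ∧
            PySem.Chars.find row ['X'] > -1 then
          row ++ ['O', ' ']
        else
          row ++ [' ', ' ']) []
      drawing ++ pvRstripOSpace row ++ ['\n']) [])

-- ===== PORT B =====
def draw_data_alt (data : List Int) : String :=
  let m := (PySem.List.max? data (fun x => x)).getD 0
  let suf := ((data.reverse.foldl (fun (p : List Int × Int) x =>
      (p.1 ++ [max p.2 x], max p.2 x)) ([], PySem.List.pyGetD data (-1) 0)).1).reverse
  let pre := (data.foldl (fun (p : List Int × Int) x =>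
      (p.1 ++ [p.2], max p.2 x)) ([], PySem.List.pyGetD data 0 0)).1
  let rows := (PySem.List.pyRange m 0 (-1)).foldl (fun rows t =>
    let p := (PySem.List.pyRange 0 (PySem.List.len data) 1).foldl
        (fun (p : List (List Char) × Int) j =>
          if PySem.List.pyGetD data j 0 ≥ t then (p.1 ++ [['X', ' ']], j)
          else if 0 < j ∧ PySem.List.pyGetD data j 0 < PySem.List.pyGetD suf j 0 ∧
              PySem.List.pyGetD pre j 0 ≥ t then (p.1 ++ [['O', ' ']], p.2)
          else (p.1 ++ [[' ', ' ']], p.2)) ([], 0)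
    rows ++ [(PySem.List.slice p.1 none (some p.2)).flatten ++ ['X', '\n']]) []
  String.ofList rows.flatten

-- ===== PRECONDITION & SPEC =====
-- Pre_ excludes only the empty list, on which Python A raises ValueError (max of empty sequence).
def Pre_draw_data (data : List Int) : Prop := data ≠ []
instance (data : List Int) : Decidable (Pre_draw_data data) := by unfold Pre_draw_data; infer_instance
def pvWitness_draw_data : List Int := ([3, 1, 2])

def Spec_draw_data (data : List Int) (out : String) : Prop := out = draw_data_alt data
instance (data : List Int) (out : String) : Decidable (Spec_draw_data data out) := by unfold Spec_draw_data; infer_instance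

-- ===== CLAIM (what is proved, stated in full; the proofs are below) =====
def Claim_equal_draw_data : Prop := ∀ (data : List Int), Dom_draw_data data → Pre_draw_data data → Spec_draw_data data (draw_data data)

-- ===== LEMMAS AND PROOFS =====
theorem pvFoldlMaxComm (l : List Int) (a x : Int) :
    l.foldl max (max a x) = max (l.foldl max a) x := by
  induction l generalizing a with
  | nil => rfl
  | cons y l ih =>
    simp only [List.foldl_cons]
    rw [max_right_comm a x y, ih]

theorem pvFoldlMaxReverse (l : List Int) (a : Int) :
    l.reverse.foldl max a = l.foldl max a := by
  induction l generalizing a with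
  | nil => rfl
  | cons y l ih =>
    simp only [List.reverse_cons, List.foldl_append, List.foldl_cons, List.foldl_nil]
    rw [← pvFoldlMaxComm, ih]

theorem pvFindXIff (r : List Char) : PySem.Chars.find r ['X'] > -1 ↔ 'X' ∈ r := by
  rw [← List.singleton_infix_iff, ← PySem.Chars.find_nonneg_iff]
  omega


theorem pvRstripAppend (xs ys : List Char) (h : ∀ c ∈ ys, c = 'O' ∨ c = ' ') :
    pvRstripOSpace (xs ++ ys) = pvRstripOSpace xs := by
  unfold pvRstripOSpace
  rw [List.reverse_append, List.dropWhile_append]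
  have : ys.reverse.dropWhile (fun c => c == 'O' || c == ' ') = [] := by
    rw [List.dropWhile_eq_nil_iff]
    intro c hc
    rcases h c (List.mem_reverse.mp hc) with h' | h' <;> simp [h']
  simp [this]

theorem pvRstripX (xs : List Char) : pvRstripOSpace (xs ++ ['X', ' ']) = xs ++ ['X'] := by
  unfold pvRstripOSpace
  rw [List.reverse_append]
  simp [List.dropWhile]

theorem pvMaxGeIff (l : List Int) (h : l ≠ []) (t : Int) :
    (PySem.List.max? l (fun x => x)).getD 0 ≥ t ↔ ∃ x ∈ l, x ≥ t := by
  obtain ⟨y, u, rfl⟩ := List.exists_cons_of_ne_nil h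
  rw [PySem.List.max?_id_cons]
  simp only [Option.getD_some]
  constructor
  · intro hge
    rcases PySem.List.foldl_max_mem u y with h' | h'
    · exact ⟨y, by simp, by omega⟩
    · exact ⟨u.foldl max y, by simp [h'], hge⟩
  · rintro ⟨x, hx, hxt⟩
    rcases List.mem_cons.mp hx with rfl | hx
    · have := (PySem.List.le_foldl_max u x).1; omega
    · have := (PySem.List.le_foldl_max u y).2 x hx; omega

theorem pvPremaxGeIff (d : List Int) (t : Int) (j : Nat) (h0 : 0 < j) (hj : j ≤ d.length) :
    (PySem.List.max? (d.take j) (fun x => x)).getD 0 ≥ t ↔ ∃ k : Nat, k < j ∧ d.getD k 0 ≥ t := by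
  have hne : d.take j ≠ [] := by
    simp only [ne_eq, List.take_eq_nil_iff, not_or]
    refine ⟨by omega, fun hd => ?_⟩
    subst hd
    simp at hj
    omega
  rw [pvMaxGeIff _ hne]
  constructor
  · rintro ⟨x, hx, hxt⟩
    obtain ⟨k, hk, hke⟩ := List.getElem_of_mem hx
    rw [List.getElem_take] at hke
    have hkj : k < j := by simp [List.length_take] at hk; omega
    exact ⟨k, hkj, by rw [List.getD_eq_getElem _ _ (by omega)]; omega⟩
  · rintro ⟨k, hk, hkt⟩
    rw [List.getD_eq_getElem _ _ (by omega)] at hkt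
    refine ⟨d[k], ?_, hkt⟩
    have : (d.take j)[k]'(by simp [List.length_take]; omega) = d[k] := List.getElem_take
    rw [← this]
    exact List.getElem_mem _

theorem pvSufFold (u : List Int) (ys : List Int) (c : Int) :
    u.foldl (fun (p : List Int × Int) x => (p.1 ++ [max p.2 x], max p.2 x)) (ys, c)
    = (ys ++ (List.range u.length).map (fun i => (u.take (i + 1)).foldl max c), u.foldl max c) := by
  induction u generalizing ys c with
  | nil => simp
  | cons x u ih =>
    simp only [List.foldl_cons, ih, List.length_cons, List.range_succ_eq_map, List.map_cons,
      List.map_map]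
    refine Prod.ext ?_ rfl
    simp only [List.take_succ_cons, List.foldl_cons]
    rw [List.append_assoc]
    rfl

theorem pvPreFold (u : List Int) (ys : List Int) (c : Int) :
    u.foldl (fun (p : List Int × Int) x => (p.1 ++ [p.2], max p.2 x)) (ys, c)
    = (ys ++ (List.range u.length).map (fun i => (u.take i).foldl max c), u.foldl max c) := by
  induction u generalizing ys c with
  | nil => simp
  | cons x u ih =>
    simp only [List.foldl_cons, ih, List.length_cons, List.range_succ_eq_map, List.map_cons,
      List.map_map]
    refine Prod.ext ?_ rfl
    simp only [List.take_zero, List.foldl_nil]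
    rw [List.append_assoc]
    rfl

def pvLast (d : List Int) (t : Int) (n : Nat) : Nat :=
  (List.range n).foldl (fun l j => if d.getD j 0 ≥ t then j else l) 0

theorem pvLastSpec (d : List Int) (t : Int) (n : Nat) (h : ∃ j, j < n ∧ d.getD j 0 ≥ t) :
    pvLast d t n < n ∧ d.getD (pvLast d t n) 0 ≥ t ∧
      ∀ j, pvLast d t n < j → j < n → ¬ d.getD j 0 ≥ t := by
  induction n with
  | zero => omega
  | succ n ih =>
    unfold pvLast
    rw [List.range_succ, List.foldl_append, List.foldl_cons, List.foldl_nil]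
    by_cases hn : d.getD n 0 ≥ t
    · rw [if_pos hn]
      exact ⟨by omega, hn, by omega⟩
    · rw [if_neg hn]
      obtain ⟨j, hj, hjt⟩ := h
      have hjn : j < n := by
        rcases Nat.lt_succ_iff_lt_or_eq.mp hj with h' | h'
        · exact h'
        · subst h'; exact absurd hjt hn
      obtain ⟨h1, h2, h3⟩ := ih ⟨j, hjn, hjt⟩
      unfold pvLast at h1 h2 h3
      refine ⟨by omega, h2, fun j' hj1 hj2 => ?_⟩
      rcases Nat.lt_succ_iff_lt_or_eq.mp hj2 with h' | h'
      · exact h3 j' hj1 h'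
      · subst h'; exact hn

def pvCell (d : List Int) (t : Int) (j : Nat) : List Char :=
  if d.getD j 0 ≥ t then ['X', ' ']
  else if 0 < j ∧ d.getD j 0 < (PySem.List.max? (d.drop j) (fun x => x)).getD 0 ∧
      (∃ k : Nat, k < j ∧ d.getD k 0 ≥ t) then ['O', ' ']
  else [' ', ' ']

theorem pvXMemCell (d : List Int) (t : Int) (j : Nat) :
    'X' ∈ pvCell d t j ↔ d.getD j 0 ≥ t := by
  unfold pvCell
  split
  · simp_all
  · split <;> simp_all

theorem pvRowAEq (d : List Int) (t : Int) :
    ∀ (k : Nat) (a : Int) (r0 : List Char), 0 ≤ a → a ≤ (d.length : Int) →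
    d.length - a.toNat = k →
    (('X' ∈ r0) ↔ ∃ i : Nat, i < a.toNat ∧ d.getD i 0 ≥ t) →
    ((PySem.List.pyRange a (PySem.List.len d) 1).foldl (fun row j =>
      if PySem.List.pyGetD d j 0 ≥ t then row ++ ['X', ' ']
      else if 0 < j ∧ PySem.List.pyGetD d j 0 <
            (PySem.List.max? (PySem.List.slice d (some j) none) (fun x => x)).getD 0 ∧
          PySem.Chars.find row ['X'] > -1 then row ++ ['O', ' ']
      else row ++ [' ', ' ']) r0)
    = r0 ++ (List.range' a.toNat (d.length - a.toNat)).flatMap (pvCell d t) := by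
  intro k
  induction k with
  | zero =>
    intro a r0 h0 ha hk hX
    have : a = (d.length : Int) := by omega
    subst this
    rw [PySem.List.len_eq, PySem.List.pyRange_one_eq_nil (by omega)]
    simp [hk]
  | succ k ih =>
    intro a r0 h0 ha hk hX
    obtain ⟨j0, rfl⟩ := Int.eq_ofNat_of_zero_le h0
    simp only [Int.toNat_natCast] at hk hX ⊢
    have hlt : (j0 : Int) < (d.length : Int) := by omega
    rw [PySem.List.len_eq, PySem.List.pyRange_one_cons hlt, List.foldl_cons]
    have hrange : List.range' j0 (d.length - j0)
        = j0 :: List.range' (j0 + 1) (d.length - (j0 + 1)) := by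
      have : d.length - j0 = (d.length - (j0 + 1)) + 1 := by clear hX ih; omega
      rw [this, List.range'_succ]
    have hget : PySem.List.pyGetD d (j0 : Int) 0 = d.getD j0 0 :=
      PySem.List.pyGetD_natCast d j0 0
    have hslice : PySem.List.slice d (some (j0 : Int)) none = d.drop j0 :=
      PySem.List.slice_from_natCast d j0
    have hstep : (if PySem.List.pyGetD d (j0 : Int) 0 ≥ t then r0 ++ ['X', ' ']
      else if 0 < (j0 : Int) ∧ PySem.List.pyGetD d (j0 : Int) 0 <
            (PySem.List.max? (PySem.List.slice d (some (j0 : Int)) none) (fun x => x)).getD 0 ∧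
          PySem.Chars.find r0 ['X'] > -1 then r0 ++ ['O', ' ']
      else r0 ++ [' ', ' ']) = r0 ++ pvCell d t j0 := by
      rw [hget, hslice]
      unfold pvCell
      by_cases h1 : d.getD j0 0 ≥ t
      · rw [if_pos h1, if_pos h1]
      · rw [if_neg h1, if_neg h1]
        by_cases h2 : 0 < j0 ∧ d.getD j0 0 <
            (PySem.List.max? (d.drop j0) (fun x => x)).getD 0 ∧
            (∃ k : Nat, k < j0 ∧ d.getD k 0 ≥ t)
        · rw [if_pos h2, if_pos ⟨by omega, h2.2.1, (pvFindXIff r0).mpr (hX.mpr h2.2.2)⟩]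
        · rw [if_neg h2, if_neg ?_]
          intro ⟨hc1, hc2, hc3⟩
          exact h2 ⟨by omega, hc2, hX.mp ((pvFindXIff r0).mp hc3)⟩
    rw [hstep]
    have hIH := ih ((j0 : Int) + 1) (r0 ++ pvCell d t j0) (by clear hX ih; omega)
      (by clear hX ih; omega) (by clear hX ih; omega) ?_
    · rw [PySem.List.len_eq] at hIH
      rw [hIH, hrange]
      have : ((j0 : Int) + 1).toNat = j0 + 1 := by clear hX ih hIH; omega
      rw [this, List.flatMap_cons, ← List.append_assoc]
    · have : ((j0 : Int) + 1).toNat = j0 + 1 := by clear hX ih; omega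
      rw [this, List.mem_append, pvXMemCell, hX]
      constructor
      · rintro (⟨i, hi, hit⟩ | hit)
        · exact ⟨i, by omega, hit⟩
        · exact ⟨j0, by omega, hit⟩
      · rintro ⟨i, hi, hit⟩
        rcases Nat.lt_succ_iff_lt_or_eq.mp hi with h' | h'
        · exact Or.inl ⟨i, h', hit⟩
        · subst h'; exact Or.inr hit

theorem pvRowBEq (d S P : List Int) (t : Int)
    (hS : ∀ j : Nat, j < d.length → PySem.List.pyGetD S (j : Int) 0 = (PySem.List.max? (d.drop j) (fun x => x)).getD 0)
    (hP : ∀ j : Nat, 0 < j → j < d.length → PySem.List.pyGetD P (j : Int) 0 = (PySem.List.max? (d.take j) (fun x => x)).getD 0) :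
    ∀ (k : Nat) (a : Int) (cs0 : List (List Char)) (l0 : Int), 0 ≤ a → a ≤ (d.length : Int) →
    d.length - a.toNat = k →
    ((PySem.List.pyRange a (PySem.List.len d) 1).foldl
      (fun (p : List (List Char) × Int) j =>
        if PySem.List.pyGetD d j 0 ≥ t then (p.1 ++ [['X', ' ']], j)
        else if 0 < j ∧ PySem.List.pyGetD d j 0 < PySem.List.pyGetD S j 0 ∧
            PySem.List.pyGetD P j 0 ≥ t then (p.1 ++ [['O', ' ']], p.2)
        else (p.1 ++ [[' ', ' ']], p.2)) (cs0, l0))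
    = (cs0 ++ (List.range' a.toNat (d.length - a.toNat)).map (pvCell d t),
       (List.range' a.toNat (d.length - a.toNat)).foldl
         (fun l j => if d.getD j 0 ≥ t then (j : Int) else l) l0) := by
  intro k
  induction k with
  | zero =>
    intro a cs0 l0 h0 ha hk
    have : a = (d.length : Int) := by omega
    subst this
    rw [PySem.List.len_eq, PySem.List.pyRange_one_eq_nil (by omega)]
    simp [hk]
  | succ k ih =>
    intro a cs0 l0 h0 ha hk
    obtain ⟨j0, rfl⟩ := Int.eq_ofNat_of_zero_le h0
    simp only [Int.toNat_natCast] at hk ⊢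
    have hlt : (j0 : Int) < (d.length : Int) := by omega
    have hjn : j0 < d.length := by omega
    rw [PySem.List.len_eq, PySem.List.pyRange_one_cons hlt, List.foldl_cons]
    have hrange : List.range' j0 (d.length - j0)
        = j0 :: List.range' (j0 + 1) (d.length - (j0 + 1)) := by
      have : d.length - j0 = (d.length - (j0 + 1)) + 1 := by omega
      rw [this, List.range'_succ]
    have hget : PySem.List.pyGetD d (j0 : Int) 0 = d.getD j0 0 :=
      PySem.List.pyGetD_natCast d j0 0
    have hstep : (if PySem.List.pyGetD d (j0 : Int) 0 ≥ t then (cs0 ++ [['X', ' ']], ((j0 : Nat) : Int))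
        else if 0 < ((j0 : Nat) : Int) ∧ PySem.List.pyGetD d (j0 : Int) 0 < PySem.List.pyGetD S (j0 : Int) 0 ∧
            PySem.List.pyGetD P (j0 : Int) 0 ≥ t then (cs0 ++ [['O', ' ']], l0)
        else (cs0 ++ [[' ', ' ']], l0))
        = (cs0 ++ [pvCell d t j0], if d.getD j0 0 ≥ t then ((j0 : Nat) : Int) else l0) := by
      rw [hget]
      unfold pvCell
      by_cases h1 : d.getD j0 0 ≥ t
      · rw [if_pos h1, if_pos h1, if_pos h1]
      · rw [if_neg h1, if_neg h1, if_neg h1]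
        by_cases h2 : 0 < j0 ∧ d.getD j0 0 <
            (PySem.List.max? (d.drop j0) (fun x => x)).getD 0 ∧
            (∃ k : Nat, k < j0 ∧ d.getD k 0 ≥ t)
        · rw [if_pos h2, if_pos ?_]
          refine ⟨by exact_mod_cast h2.1, ?_, ?_⟩
          · rw [hS j0 hjn]; exact h2.2.1
          · rw [hP j0 h2.1 hjn]
            exact (pvPremaxGeIff d t j0 h2.1 (by omega)).mpr h2.2.2
        · rw [if_neg h2, if_neg ?_]
          rintro ⟨hc1, hc2, hc3⟩
          have hj0 : 0 < j0 := by exact_mod_cast hc1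
          refine h2 ⟨hj0, ?_, ?_⟩
          · rw [hS j0 hjn] at hc2; exact hc2
          · rw [hP j0 hj0 hjn] at hc3
            exact (pvPremaxGeIff d t j0 hj0 (by omega)).mp hc3
    rw [hstep]
    have hIH := ih ((j0 : Int) + 1) (cs0 ++ [pvCell d t j0])
      (if d.getD j0 0 ≥ t then ((j0 : Nat) : Int) else l0) (by omega) (by omega) (by omega)
    rw [PySem.List.len_eq] at hIH
    rw [hIH, hrange]
    have h1 : ((j0 : Int) + 1).toNat = j0 + 1 := by omega
    rw [h1, List.map_cons, List.foldl_cons]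
    simp [List.append_assoc]

theorem pvFoldlMaxMemInit (u : List Int) (y c : Int) (hc : c ∈ y :: u) :
    u.foldl max (max y c) = u.foldl max y := by
  rcases List.mem_cons.mp hc with rfl | hc
  · rw [max_self]
  · rw [pvFoldlMaxComm]
    exact max_eq_left ((PySem.List.le_foldl_max u y).2 c hc)

theorem pvSufGet (d : List Int) (h : d ≠ []) (j : Nat) (hj : j < d.length) :
    PySem.List.pyGetD
      (((d.reverse.foldl (fun (p : List Int × Int) x => (p.1 ++ [max p.2 x], max p.2 x))
        ([], PySem.List.pyGetD d (-1) 0)).1).reverse) (j : Int) 0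
    = (PySem.List.max? (d.drop j) (fun x => x)).getD 0 := by
  rw [PySem.List.pyGetD_neg_one d 0 h, pvSufFold, PySem.List.pyGetD_natCast, List.nil_append]
  rw [List.getD_eq_getElem _ _ (by simpa using hj)]
  simp only [List.getElem_reverse, List.length_map, List.length_range, List.length_reverse,
    List.getElem_map, List.getElem_range]
  have hdrop : d.reverse.take ((d.length - 1 - j) + 1) = (d.drop j).reverse := by
    have : d.length - (d.length - 1 - j + 1) = j := by omega
    rw [List.take_reverse, this]
  rw [hdrop, pvFoldlMaxReverse]
  have hne : d.drop j ≠ [] := by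
    simp only [ne_eq, List.drop_eq_nil_iff]
    omega
  obtain ⟨y, u, hyu⟩ := List.exists_cons_of_ne_nil hne
  have hcmem : d.getLast h ∈ d.drop j := by
    have hlast : (d.drop j).getLast hne = d.getLast h := List.getLast_drop hne
    exact hlast ▸ List.getLast_mem hne
  rw [hyu] at hcmem ⊢
  rw [PySem.List.max?_id_cons, Option.getD_some, List.foldl_cons, max_comm]
  exact pvFoldlMaxMemInit u y _ hcmem

theorem pvPreGet (d : List Int) (h : d ≠ []) (j : Nat) (h0 : 0 < j) (hj : j < d.length) :
    PySem.List.pyGetD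
      ((d.foldl (fun (p : List Int × Int) x => (p.1 ++ [p.2], max p.2 x))
        ([], PySem.List.pyGetD d 0 0)).1) (j : Int) 0
    = (PySem.List.max? (d.take j) (fun x => x)).getD 0 := by
  obtain ⟨y, u, rfl⟩ := List.exists_cons_of_ne_nil h
  rw [pvPreFold, PySem.List.pyGetD_natCast, List.nil_append]
  rw [List.getD_eq_getElem _ _ (by simpa using hj)]
  rw [List.getElem_map, List.getElem_range]
  obtain ⟨j', rfl⟩ := Nat.exists_eq_succ_of_ne_zero (by omega : j ≠ 0)
  rw [List.take_succ_cons, PySem.List.max?_id_cons, Option.getD_some]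
  simp only [PySem.List.pyGetD_zero_cons, List.foldl_cons]
  rw [max_self]

theorem pvCellNoX (d : List Int) (t : Int) (j : Nat) (h : ¬ d.getD j 0 ≥ t) :
    pvCell d t j = ['O', ' '] ∨ pvCell d t j = [' ', ' '] := by
  unfold pvCell
  rw [if_neg h]
  split
  · exact Or.inl rfl
  · exact Or.inr rfl

theorem pvRowEq (d : List Int) (t : Int)
    (hex : ∃ j, j < d.length ∧ d.getD j 0 ≥ t) :
    pvRstripOSpace ((List.range d.length).flatMap (pvCell d t)) ++ ['\n']
    = (((List.range d.length).map (pvCell d t)).take (pvLast d t d.length)).flatten ++ ['X', '\n'] := by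
  obtain ⟨hL1, hL2, hL3⟩ := pvLastSpec d t d.length hex
  set n := d.length with hn
  set L := pvLast d t n with hLdef
  have hsplit : List.range n = List.range (L + 1) ++ (List.range (n - (L + 1))).map (fun i => (L + 1) + i) := by
    rw [← List.range_add]
    congr 1
    omega
  have hcellL : pvCell d t L = ['X', ' '] := by
    unfold pvCell
    rw [if_pos hL2]
  have htail : ∀ c ∈ ((List.range (n - (L + 1))).map (fun i => (L + 1) + i)).flatMap (pvCell d t),
      c = 'O' ∨ c = ' ' := by
    intro c hc
    rw [List.flatMap_map] at hc
    obtain ⟨i, hi, hci⟩ := List.mem_flatMap.mp hc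
    have hin : i < n - (L + 1) := List.mem_range.mp hi
    have : ¬ d.getD ((L + 1) + i) 0 ≥ t := hL3 _ (by omega) (by omega)
    rcases pvCellNoX d t _ this with h' | h' <;>
      · rw [h'] at hci
        simp at hci
        tauto
  have hrhs : (((List.range n).map (pvCell d t)).take L).flatten
      = (List.range L).flatMap (pvCell d t) := by
    rw [← List.map_take, List.take_range, Nat.min_eq_left (by omega), List.flatMap_def]
  rw [hrhs]
  conv_lhs => rw [hsplit]
  rw [List.flatMap_append, pvRstripAppend _ _ htail, List.range_succ, List.flatMap_append,
    List.flatMap_singleton, hcellL, pvRstripX, List.append_assoc]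
  rfl

theorem pvFoldlAppendNL (l : List Int) (f : Int → List Char) (acc : List Char) :
    l.foldl (fun drawing i => drawing ++ f i ++ ['\n']) acc
    = acc ++ l.flatMap (fun i => f i ++ ['\n']) := by
  induction l generalizing acc with
  | nil => simp
  | cons x l ih =>
    rw [List.foldl_cons, ih, List.flatMap_cons]
    simp [List.append_assoc]

theorem pvLastIntNat (d : List Int) (t : Int) (l : List Nat) (a : Nat) :
    l.foldl (fun (acc : Int) j => if d.getD j 0 ≥ t then ((j : Nat) : Int) else acc) ((a : Nat) : Int)
    = ((l.foldl (fun acc j => if d.getD j 0 ≥ t then j else acc) a : Nat) : Int) := by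
  induction l generalizing a with
  | nil => rfl
  | cons x l ih =>
    simp only [List.foldl_cons]
    by_cases h : d.getD x 0 ≥ t
    · rw [if_pos h, if_pos h, ih]
    · rw [if_neg h, if_neg h, ih]

-- ===== VERDICT (by name: the statement is the Claim_ definition above) =====
theorem draw_data_spec : Claim_equal_draw_data := by
  intro data hdom hpre
  unfold Spec_draw_data draw_data draw_data_alt
  have hS : ∀ j : Nat, j < data.length →
      PySem.List.pyGetD
        (((data.reverse.foldl (fun (p : List Int × Int) x => (p.1 ++ [max p.2 x], max p.2 x))
          ([], PySem.List.pyGetD data (-1) 0)).1).reverse) (j : Int) 0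
      = (PySem.List.max? (data.drop j) (fun x => x)).getD 0 :=
    fun j hj => pvSufGet data hpre j hj
  have hP : ∀ j : Nat, 0 < j → j < data.length →
      PySem.List.pyGetD
        ((data.foldl (fun (p : List Int × Int) x => (p.1 ++ [p.2], max p.2 x))
          ([], PySem.List.pyGetD data 0 0)).1) (j : Int) 0
      = (PySem.List.max? (data.take j) (fun x => x)).getD 0 :=
    fun j h0 hj => pvPreGet data hpre j h0 hj
  congr 1
  rw [pvFoldlAppendNL, PySem.List.foldl_append_eq_flatMap, List.nil_append, List.nil_append]
  generalize hM : (PySem.List.max? data (fun x => x)).getD 0 = M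
  have hMmem : M ∈ data := by
    cases h : PySem.List.max? data (fun x => x) with
    | none => exact absurd ((PySem.List.max?_eq_none_iff data (fun x => x)).mp h) hpre
    | some m =>
      have hm := PySem.List.max?_mem h
      rw [h, Option.getD_some] at hM
      exact hM ▸ hm
  rw [PySem.List.pyRange_one 0 M, PySem.List.pyRange_neg_one M 0, Int.sub_zero,
    List.flatMap_map, List.flatMap_map, ← List.map_eq_flatMap, ← List.flatMap_def,
    List.flatMap_def, List.flatMap_def]
  congr 1
  apply List.map_congr_left
  intro k hk
  have hkM : (k : Int) < M := by
    have := List.mem_range.mp hk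
    omega
  simp only [zero_add]
  set t := M - (k : Int) with ht
  -- existence of an X cell in this row
  have hex : ∃ j, j < data.length ∧ data.getD j 0 ≥ t := by
    obtain ⟨idx, hidx, heq⟩ := List.getElem_of_mem hMmem
    exact ⟨idx, hidx, by rw [List.getD_eq_getElem _ _ hidx, heq]; omega⟩
  -- A side
  have hA := pvRowAEq data t data.length 0 [] (le_refl 0) (by omega) (by simp) (by simp)
  rw [Int.toNat_zero, Nat.sub_zero, ← List.range_eq_range'] at hA
  rw [hA, List.nil_append]
  -- B side
  have hB := pvRowBEq data _ _ t hS hP data.length 0 [] 0 (le_refl 0) (by omega) (by simp)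
  rw [Int.toNat_zero, Nat.sub_zero, ← List.range_eq_range'] at hB
  rw [hB, List.nil_append]
  have hL := pvLastIntNat data t (List.range data.length) 0
  rw [Nat.cast_zero] at hL
  rw [hL, PySem.List.slice_to_natCast]
  exact pvRowEq data t hex
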